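-- pv_equiv track=rewrite | github.com/C-Kitching/Project-Euler | 26 - Reciprocal cycles.py | calculate_longest_cycle_d
-- ===== SOURCE A (Python) =====
-- def calculate_longest_cycle_d(N):
--     """For every number in the range [1, N], determine the number d with the
--     largest recipricol decimal cycle
--
--     Args:
--         N (int): maximum d to check
--
--     Returns:
--         int[]: the ith element gives the value of d < i+1 that has the longest
--         recipricol decimal cycle
--     """
--
--
--     # initialise with d = 3
--     # because it is the first repeating decimal
--     max_length_and_corresponding_d = [1, 3]
--     longest_cycle_d = [0, 0, 0, 0]
--
--     # start search from 4
--     for d in range(4, N+1):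
--
--         # if divisor is divisable by 2 or 5
--         # then this cycle is no longer than the previously found max
--         if d%2==0 or d%5==0:
--             longest_cycle_d.append(max_length_and_corresponding_d[1])
--
--         else:
--
--             # we store max before current as we want d < N
--             longest_cycle_d.append(max_length_and_corresponding_d[1])
--
--             # find the value of n such that (10^n)mod(d) = 1
--             # Note that using the pow function is too expensive
--             # modular arithmetic is faster by noting
--             # (a*b)mod(d) = ((a)mod(d))*(b)mod(d)
--             # so *10 %d repeated n times is equivilant to doing (10^n)mod(d)
--             l = 1
--             rem = 1
--             while True:
--                 rem *= 10
--                 rem %= d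
--                 if rem == 1: break
--                 l += 1
--
--             # if it is longer than the current max
--             if l > max_length_and_corresponding_d[0]:
--                 max_length_and_corresponding_d = [l, d]
--
--     return longest_cycle_d
-- ===== SOURCE B (Python) =====
-- def calculate_longest_cycle_d(N):
--     """For every number in the range [1, N], determine the number d with the
--     largest reciprocal decimal cycle.  Staged, declarative formulation: first
--     tabulate every cycle length once, then each output element is literally
--     'the first d below i+1 whose cycle is longest', written as max with a key
--     (Python's max keeps the first maximal element, matching the original's
--     strict-improvement rule)."""
--     lens = [_cycle_len(d) for d in range(3, max(N, 3))]
--     return [0, 0, 0, 0] + [max(range(3, d), key=lambda x: lens[x - 3])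
--                            for d in range(4, N + 1)]
--
--
-- def _cycle_len(d):
--     # length of the reciprocal cycle of 1/d; 0 when 1/d is not purely periodic
--     if d % 2 == 0 or d % 5 == 0:
--         return 0
--     l = 1
--     while pow(10, l, d) != 1:
--         l += 1
--     return l
-- ===== Notes on version B (the rewrite author's own statement) =====
-- stated objective: idiomatic
-- what changed: B replaces A's single stateful fold (running best kept in a mutable pair, output grown inside the loop) by two staged declarative passes: a table of all cycle lengths built once, then each output element computed directly as max(range(3, d), key=...) using Python's first-maximum tie-break, with cycle lengths obtained from the built-in three-argument pow instead of A's hand-rolled remainder loop.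
import Mathlib
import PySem

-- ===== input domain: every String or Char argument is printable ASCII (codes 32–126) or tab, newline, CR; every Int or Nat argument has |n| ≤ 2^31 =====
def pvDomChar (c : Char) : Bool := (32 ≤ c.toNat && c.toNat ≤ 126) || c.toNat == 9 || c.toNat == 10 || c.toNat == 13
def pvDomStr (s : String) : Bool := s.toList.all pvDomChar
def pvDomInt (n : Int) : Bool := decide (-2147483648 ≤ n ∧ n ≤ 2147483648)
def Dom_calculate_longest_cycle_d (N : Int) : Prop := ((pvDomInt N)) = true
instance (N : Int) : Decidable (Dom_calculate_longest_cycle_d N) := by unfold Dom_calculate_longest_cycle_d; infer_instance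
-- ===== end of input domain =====

-- B tabulates every cycle length once, then defines each output element directly as the first
-- maximum of the prefix (max with a key), instead of A's single stateful fold; not faster.


-- ===== PORT A =====
-- A's inner `while True` loop; the fuel `d.toNat` only makes it total: for the d it is called on
-- (4 ≤ d, gcd(d,10) = 1) the loop breaks within d iterations, exactly as the Python does.
def pvOrdA (d : Int) : Nat → Int → Int → Int
  | 0, l, _ => l
  | f + 1, l, rem =>
      let rem2 := PySem.Int.mod (rem * 10) d
      if rem2 = 1 then l else pvOrdA d f (l + 1) rem2

def calculate_longest_cycle_d (N : Int) : List Int :=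
  (((PySem.List.pyRange 4 (N + 1) 1).foldl
    (fun (st : (Int × Int) × List Int) d =>
      if PySem.Int.mod d 2 = 0 ∨ PySem.Int.mod d 5 = 0 then
        (st.1, st.2 ++ [st.1.2])
      else
        let out2 := st.2 ++ [st.1.2]
        let l := pvOrdA d d.toNat 1 1
        if l > st.1.1 then ((l, d), out2) else (st.1, out2))
    ((1, 3), [0, 0, 0, 0]))).2

-- ===== PORT B =====
-- Source B's `while pow(10, l, d) != 1` loop of _cycle_len; the fuel `d.toNat` only makes it
-- total: for coprime d the loop breaks within d iterations, exactly as the Python does.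
def pvOrdB (d : Int) : Nat → Int → Int
  | 0, l => l
  | f + 1, l => if PySem.Int.powMod 10 l.toNat d = 1 then l else pvOrdB d f (l + 1)

-- Source B's _cycle_len
def pvCycleLen (d : Int) : Int :=
  if PySem.Int.mod d 2 = 0 ∨ PySem.Int.mod d 5 = 0 then 0
  else pvOrdB d d.toNat 1

-- Python's `max(range(3, d), key=…)` is applied only to nonempty ranges (4 ≤ d), so the
-- default 0 of PySem.List.maxD is never used.
def calculate_longest_cycle_d_alt (N : Int) : List Int :=
  let lens := (PySem.List.pyRange 3 (max N 3) 1).map pvCycleLen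
  [0, 0, 0, 0] ++ (PySem.List.pyRange 4 (N + 1) 1).map
    (fun d => PySem.List.maxD (PySem.List.pyRange 3 d 1)
      (fun x => PySem.List.pyGetD lens (x - 3) 0) 0)

-- ===== PRECONDITION & SPEC =====
def Spec_calculate_longest_cycle_d (N : Int) (out : List Int) : Prop := out = calculate_longest_cycle_d_alt N
instance (N : Int) (out : List Int) : Decidable (Spec_calculate_longest_cycle_d N out) := by unfold Spec_calculate_longest_cycle_d; infer_instance

-- ===== CLAIM (what is proved, stated in full; the proofs are below) =====
def Claim_equal_calculate_longest_cycle_d : Prop := ∀ (N : Int), Dom_calculate_longest_cycle_d N → Spec_calculate_longest_cycle_d N (calculate_longest_cycle_d N)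

-- ===== LEMMAS AND PROOFS =====

-- the two inner loops agree, for the same fuel, whenever `rem ≡ 10^(l-1) (mod d)`
theorem pvOrd_eq (d : Int) (hd : 0 < d) :
    ∀ (f : Nat) (l rem : Int), 1 ≤ l →
      PySem.Int.mod rem d = PySem.Int.mod (10 ^ (l - 1).toNat) d →
      pvOrdA d f l rem = pvOrdB d f l := by
  intro f
  induction f with
  | zero => intro l rem _ _; rfl
  | succ f ih =>
      intro l rem hl hrem
      have hmod : ∀ a : Int, PySem.Int.mod a d = a % d :=
        fun a => PySem.Int.mod_eq_emod_of_pos hd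
      have hmul : ∀ a : Int, a % d * 10 % d = a * 10 % d := by
        intro a
        rw [Int.mul_emod, Int.emod_emod_of_dvd a (dvd_refl d), ← Int.mul_emod]
      have hrem' : rem % d = 10 ^ (l - 1).toNat % d := by
        rw [← hmod, ← hmod]; exact hrem
      have hkey : PySem.Int.mod (rem * 10) d = PySem.Int.mod (10 ^ l.toNat) d := by
        rw [hmod, hmod]
        have h2 : (10 : Int) ^ (l - 1).toNat * 10 % d = 10 ^ l.toNat % d := by
          have h3 : (l - 1).toNat + 1 = l.toNat := by omega
          rw [← h3, pow_succ]
        calc rem * 10 % d = rem % d * 10 % d := (hmul rem).symm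
          _ = 10 ^ (l - 1).toNat % d * 10 % d := by rw [hrem']
          _ = 10 ^ (l - 1).toNat * 10 % d := hmul _
          _ = 10 ^ l.toNat % d := h2
      have hpow : PySem.Int.powMod 10 l.toNat d = PySem.Int.mod (10 ^ l.toNat) d := rfl
      simp only [pvOrdA, pvOrdB, hkey, hpow]
      split
      · rfl
      · exact ih (l + 1) (PySem.Int.mod (10 ^ l.toNat) d) (by omega) (by
          have : l + 1 - 1 = l := by ring
          rw [this, hmod, hmod, Int.emod_emod_of_dvd _ dvd_rfl])

-- max? with two keys that agree on the list (and on the accumulator) coincide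
theorem pvMax?_congr {α : Type} (k1 k2 : α → Int) :
    ∀ (xs : List α) (acc : Option α),
      (∀ x ∈ xs, k1 x = k2 x) → (∀ m, acc = some m → k1 m = k2 m) →
      xs.foldl (fun acc x => match acc with
        | none => some x
        | some m => if k1 m < k1 x then some x else some m) acc =
      xs.foldl (fun acc x => match acc with
        | none => some x
        | some m => if k2 m < k2 x then some x else some m) acc := by
  intro xs
  induction xs with
  | nil => intro acc _ _; rfl
  | cons x xs ih =>
      intro acc h hacc
      have hx : k1 x = k2 x := h x (List.mem_cons_self ..)
      have h' : ∀ y ∈ xs, k1 y = k2 y := fun y hy => h y (List.mem_cons_of_mem _ hy)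
      cases acc with
      | none =>
          simp only [List.foldl_cons]
          exact ih (some x) h' (fun m hm => by cases hm; exact hx)
      | some m =>
          have hm : k1 m = k2 m := hacc m rfl
          simp only [List.foldl_cons, hx, hm]
          by_cases hc : k2 m < k2 x
          · simp only [if_pos hc]
            exact ih _ h' (fun y hy => by cases hy; exact hx)
          · simp only [if_neg hc]
            exact ih _ h' (fun y hy => by cases hy; exact hm)

theorem pvMax?_key_congr {α : Type} (xs : List α) (k1 k2 : α → Int)
    (h : ∀ x ∈ xs, k1 x = k2 x) :
    PySem.List.max? xs k1 = PySem.List.max? xs k2 := by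
  simp only [PySem.List.max?]
  exact pvMax?_congr k1 k2 xs none h (fun m hm => by cases hm)

-- appending one element to the candidate list updates max? by one comparison
theorem pvMax?_snoc {α : Type} (xs : List α) (x : α) (key : α → Int) (m : α)
    (h : PySem.List.max? xs key = some m) :
    PySem.List.max? (xs ++ [x]) key =
      some (if key m < key x then x else m) := by
  simp only [PySem.List.max?] at h ⊢
  rw [List.foldl_append, h]
  simp only [List.foldl_cons, List.foldl_nil]
  split_ifs <;> rfl

-- the running best of A's fold is the first maximum of the processed prefix
theorem pvFoldA_eq (n : Nat) :
    ∃ bd, PySem.List.max? (PySem.List.pyRange 3 (4 + n) 1) pvCycleLen = some bd ∧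
      1 ≤ pvCycleLen bd ∧
      ((PySem.List.pyRange 4 (4 + n) 1).foldl
        (fun (st : (Int × Int) × List Int) d =>
          if PySem.Int.mod d 2 = 0 ∨ PySem.Int.mod d 5 = 0 then
            (st.1, st.2 ++ [st.1.2])
          else
            let out2 := st.2 ++ [st.1.2]
            let l := pvOrdA d d.toNat 1 1
            if l > st.1.1 then ((l, d), out2) else (st.1, out2))
        ((1, 3), [0, 0, 0, 0])) =
      ((pvCycleLen bd, bd),
        [0, 0, 0, 0] ++ (PySem.List.pyRange 4 (4 + n) 1).map
          (fun d => PySem.List.maxD (PySem.List.pyRange 3 d 1) pvCycleLen 0)) := by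
  induction n with
  | zero => exact ⟨3, by decide, by decide, by decide⟩
  | succ n ih =>
      obtain ⟨bd, hm, hb1, hfold⟩ := ih
      have hd0 : (0 : Int) < 4 + n := by omega
      have hcast : (4 + ((n + 1 : Nat) : Int)) = (4 + (n : Int)) + 1 := by push_cast; ring
      have hr4 : PySem.List.pyRange 4 (4 + ((n + 1 : Nat) : Int)) 1 =
          PySem.List.pyRange 4 (4 + (n : Int)) 1 ++ [4 + (n : Int)] := by
        rw [hcast]; exact PySem.List.pyRange_one_succ_right (by omega)
      have hr3 : PySem.List.pyRange 3 (4 + ((n + 1 : Nat) : Int)) 1 =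
          PySem.List.pyRange 3 (4 + (n : Int)) 1 ++ [4 + (n : Int)] := by
        rw [hcast]; exact PySem.List.pyRange_one_succ_right (by omega)
      have hsnoc := pvMax?_snoc (PySem.List.pyRange 3 (4 + (n : Int)) 1) (4 + (n : Int))
        pvCycleLen bd hm
      have hbest : PySem.List.maxD (PySem.List.pyRange 3 (4 + (n : Int)) 1) pvCycleLen 0 = bd := by
        simp [PySem.List.maxD, hm]
      by_cases hc : PySem.Int.mod (4 + (n : Int)) 2 = 0 ∨ PySem.Int.mod (4 + (n : Int)) 5 = 0
      · have hcl : pvCycleLen (4 + (n : Int)) = 0 := by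
          unfold pvCycleLen; rw [if_pos hc]
        have hnm : ¬ pvCycleLen bd < pvCycleLen (4 + (n : Int)) := by omega
        refine ⟨bd, ?_, hb1, ?_⟩
        · rw [hr3, hsnoc, if_neg hnm]
        · rw [hr4, List.foldl_append, hfold]
          simp only [List.foldl_cons, List.foldl_nil, if_pos hc, List.map_append,
            List.map_cons, List.map_nil, hbest]
          simp
      · have hcl : pvCycleLen (4 + (n : Int)) =
            pvOrdA (4 + (n : Int)) (4 + (n : Int)).toNat 1 1 := by
          rw [pvOrd_eq (4 + (n : Int)) hd0 _ 1 1 le_rfl rfl]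
          unfold pvCycleLen; rw [if_neg hc]
        by_cases hgt : pvOrdA (4 + (n : Int)) (4 + (n : Int)).toNat 1 1 > pvCycleLen bd
        · refine ⟨4 + (n : Int), ?_, by omega, ?_⟩
          · rw [hr3, hsnoc, if_pos (by omega)]
          · rw [hr4, List.foldl_append, hfold]
            simp only [List.foldl_cons, List.foldl_nil, if_neg hc, if_pos hgt,
              List.map_append, List.map_cons, List.map_nil, hbest, hcl]
            simp
        · refine ⟨bd, ?_, hb1, ?_⟩
          · rw [hr3, hsnoc, if_neg (by omega)]
          · rw [hr4, List.foldl_append, hfold]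
            simp only [List.foldl_cons, List.foldl_nil, if_neg hc, if_neg hgt,
              List.map_append, List.map_cons, List.map_nil, hbest]
            simp

-- ===== VERDICT (by name: the statement is the Claim_ definition above) =====
-- the B-side key (table lookup) computes the cycle length on the relevant range
theorem pvKey_eq (N x : Int) (h3 : 3 ≤ x) (hx : x < max N 3) :
    PySem.List.pyGetD ((PySem.List.pyRange 3 (max N 3) 1).map pvCycleLen) (x - 3) 0 =
      pvCycleLen x := by
  have h0 : (0 : Int) ≤ x - 3 := by omega
  have hlen : ((PySem.List.pyRange 3 (max N 3) 1).map pvCycleLen).length =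
      (max N 3 - 3).toNat := by
    simp [PySem.List.length_pyRange_one]
  have hlt : x - 3 < (((PySem.List.pyRange 3 (max N 3) 1).map pvCycleLen).length : Int) := by
    rw [hlen]; omega
  rw [PySem.List.pyGetD_eq_getElem _ 0 h0 hlt, List.getElem_map, PySem.List.getElem_pyRange_one]
  congr 1
  omega

-- ===== VERDICT (by name: the statement is the Claim_ definition above) =====
theorem calculate_longest_cycle_d_spec : Claim_equal_calculate_longest_cycle_d := by
  intro N _
  unfold Spec_calculate_longest_cycle_d
  by_cases hN : N + 1 ≤ 4
  · unfold calculate_longest_cycle_d calculate_longest_cycle_d_alt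
    rw [PySem.List.pyRange_one_eq_nil (by omega : N + 1 ≤ 4)]
    rfl
  · have hn : (4 + ((N - 3).toNat : Int)) = N + 1 := by omega
    obtain ⟨bd, hm, hb1, hfold⟩ := pvFoldA_eq (N - 3).toNat
    unfold calculate_longest_cycle_d calculate_longest_cycle_d_alt
    rw [← hn]
    simp only [hfold]
    congr 1
    apply List.map_congr_left
    intro d hd
    have hdm := (PySem.List.mem_pyRange_one).1 hd
    simp only [PySem.List.maxD]
    congr 1
    apply pvMax?_key_congr
    intro x hxm
    have hxr := (PySem.List.mem_pyRange_one).1 hxm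
    exact (pvKey_eq N x hxr.1 (by omega)).symm
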